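-- pv_equiv track=rewrite | github.com/pypi-data/pypi-mirror-401 | packages/penbot/penbot-1.0.2.tar.gz/penbot-1.0.2/src/utils/summarization/summarizer.py | _generate_rule_based_summary
-- ===== SOURCE A (Python) =====
-- from typing import List, Dict, Any, Optional
--
-- def _generate_rule_based_summary(messages: List[Dict[str, Any]]) -> str:
--     """
--     Generate rule-based summary when LLM is unavailable.
--
--     Args:
--         messages: Messages to summarize
--
--     Returns:
--         Summary text
--     """
--     # Count message types
--     user_messages = [m for m in messages if m.get("role") == "user"]
--     assistant_messages = [m for m in messages if m.get("role") == "assistant"]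
--
--     # Extract key patterns
--     attack_types = []
--     for msg in user_messages:
--         content = msg.get("content", "").lower()
--         if "database" in content or "system" in content:
--             attack_types.append("technical_queries")
--         if "urgent" in content or "help" in content:
--             attack_types.append("urgency_tactics")
--
--     # Build summary
--     summary_parts = [
--         f"**Messages:** {len(messages)} total ({len(user_messages)} attacks, {len(assistant_messages)} responses)",
--         f"**Attack Types:** {', '.join(set(attack_types)) if attack_types else 'various approaches'}",
--         f"**Period:** Rounds 1-{len(messages)}",
--         f"**Note:** This is a rule-based summary. Enable LLM for detailed tactical analysis.",
--     ]
--
--     return "\n".join(summary_parts)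
-- ===== SOURCE B (Python) =====
-- def _generate_rule_based_summary(messages):
--     total = 0
--     users = 0
--     assistants = 0
--     has_technical = False
--     has_urgency = False
--     for m in messages:
--         total += 1
--         role = m.get("role")
--         if role == "user":
--             users += 1
--             content = m.get("content", "").lower()
--             has_technical = has_technical or "database" in content or "system" in content
--             has_urgency = has_urgency or "urgent" in content or "help" in content
--         elif role == "assistant":
--             assistants += 1
--     kinds = []
--     if has_technical:
--         kinds.append("technical_queries")
--     if has_urgency:
--         kinds.append("urgency_tactics")
--     attack = ", ".join(kinds) if kinds else "various approaches"
--     return (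
--         f"**Messages:** {total} total ({users} attacks, {assistants} responses)\n"
--         f"**Attack Types:** {attack}\n"
--         f"**Period:** Rounds 1-{total}\n"
--         f"**Note:** This is a rule-based summary. Enable LLM for detailed tactical analysis."
--     )
-- ===== Notes on version B (the rewrite author's own statement) =====
-- stated objective: simpler
-- what changed: Replaces the two filtering passes plus a third pass that builds an attack_types list (later deduplicated with set()) by a single loop that keeps two counters and two booleans, building the attack-type list directly in a fixed order.
import Mathlib
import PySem

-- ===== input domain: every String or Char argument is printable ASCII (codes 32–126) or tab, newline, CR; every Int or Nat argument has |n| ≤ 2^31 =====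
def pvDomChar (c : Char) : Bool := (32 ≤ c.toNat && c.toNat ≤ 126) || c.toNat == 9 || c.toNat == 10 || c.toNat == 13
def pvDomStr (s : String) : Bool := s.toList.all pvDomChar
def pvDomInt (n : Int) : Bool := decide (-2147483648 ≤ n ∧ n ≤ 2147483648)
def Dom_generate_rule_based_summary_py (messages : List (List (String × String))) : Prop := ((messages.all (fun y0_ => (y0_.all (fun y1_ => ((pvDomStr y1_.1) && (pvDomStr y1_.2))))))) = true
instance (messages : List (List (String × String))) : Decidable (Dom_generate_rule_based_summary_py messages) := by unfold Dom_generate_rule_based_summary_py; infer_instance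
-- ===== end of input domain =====

-- B fuses A's three passes (two filters + an attack_types-building loop) into one loop over
-- messages with two counters and two booleans; objective: simpler. Return value only, no mutation.

-- ===== PORT A =====
def pvA_userPred (m : List (String × String)) : Bool :=
  PySem.Dict.get? (PySem.Dict.mk m) "role" == some "user"

def pvA_assistantPred (m : List (String × String)) : Bool :=
  PySem.Dict.get? (PySem.Dict.mk m) "role" == some "assistant"

def pvA_attackStep (acc : List String) (msg : List (String × String)) : List String :=
  let content := PySem.Str.lower (PySem.Dict.getD (PySem.Dict.mk msg) "content" "")
  let acc := if PySem.Str.isIn "database" content || PySem.Str.isIn "system" content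
             then acc ++ ["technical_queries"] else acc
  if PySem.Str.isIn "urgent" content || PySem.Str.isIn "help" content
  then acc ++ ["urgency_tactics"] else acc

def generate_rule_based_summary_py (messages : List (List (String × String))) : String :=
  let user_messages := messages.filter pvA_userPred
  let assistant_messages := messages.filter pvA_assistantPred
  let attack_types := user_messages.foldl pvA_attackStep []
  -- set(attack_types) ported as PySem.Set.ofList (insertion order). Python's set ITERATION order
  -- in the join is hash-dependent; Pre_ keeps only inputs where the set has ≤ 1 element, where
  -- the joined string is the same in any order, so the port is exact there.
  let summary_parts : List String := [
    "**Messages:** " ++ PySem.Int.toStr (messages.length : Int) ++ " total (" ++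
      PySem.Int.toStr (user_messages.length : Int) ++ " attacks, " ++
      PySem.Int.toStr (assistant_messages.length : Int) ++ " responses)",
    "**Attack Types:** " ++ (if attack_types.isEmpty then "various approaches"
                             else PySem.Str.join ", " (PySem.Set.ofList attack_types)),
    "**Period:** Rounds 1-" ++ PySem.Int.toStr (messages.length : Int),
    "**Note:** This is a rule-based summary. Enable LLM for detailed tactical analysis."]
  PySem.Str.join "\n" summary_parts

-- ===== PORT B =====
def pvB_step (st : Nat × Nat × Nat × Bool × Bool) (m : List (String × String)) :
    Nat × Nat × Nat × Bool × Bool :=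
  match st with
  | (total, users, assistants, has_technical, has_urgency) =>
    let total := total + 1
    let role := PySem.Dict.get? (PySem.Dict.mk m) "role"
    if role == some "user" then
      let content := PySem.Str.lower (PySem.Dict.getD (PySem.Dict.mk m) "content" "")
      (total, users + 1, assistants,
       has_technical || PySem.Str.isIn "database" content || PySem.Str.isIn "system" content,
       has_urgency || PySem.Str.isIn "urgent" content || PySem.Str.isIn "help" content)
    else if role == some "assistant" then
      (total, users, assistants + 1, has_technical, has_urgency)
    else
      (total, users, assistants, has_technical, has_urgency)

def generate_rule_based_summary_py_alt (messages : List (List (String × String))) : String :=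
  match messages.foldl pvB_step (0, 0, 0, false, false) with
  | (total, users, assistants, has_technical, has_urgency) =>
    let kinds : List String :=
      (if has_technical then ["technical_queries"] else []) ++
      (if has_urgency then ["urgency_tactics"] else [])
    let attack := if kinds.isEmpty then "various approaches" else PySem.Str.join ", " kinds
    "**Messages:** " ++ PySem.Int.toStr (total : Int) ++ " total (" ++
      PySem.Int.toStr (users : Int) ++ " attacks, " ++
      PySem.Int.toStr (assistants : Int) ++ " responses)\n" ++
    "**Attack Types:** " ++ attack ++ "\n" ++
    "**Period:** Rounds 1-" ++ PySem.Int.toStr (total : Int) ++ "\n" ++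
    "**Note:** This is a rule-based summary. Enable LLM for detailed tactical analysis."

-- ===== PRECONDITION & SPEC =====
def pvPreContent (m : List (String × String)) : String :=
  PySem.Str.lower (PySem.Dict.getD (PySem.Dict.mk m) "content" "")

def pvPreTech (m : List (String × String)) : Bool :=
  (PySem.Dict.get? (PySem.Dict.mk m) "role" == some "user") &&
    (PySem.Str.isIn "database" (pvPreContent m) || PySem.Str.isIn "system" (pvPreContent m))

def pvPreUrg (m : List (String × String)) : Bool :=
  (PySem.Dict.get? (PySem.Dict.mk m) "role" == some "user") &&
    (PySem.Str.isIn "urgent" (pvPreContent m) || PySem.Str.isIn "help" (pvPreContent m))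

-- Pre_ excludes inputs whose user messages trigger BOTH attack-type keywords: there A joins a
-- two-element Python set, whose iteration order is hash-dependent (nondeterministic), so no
-- fixed order is the specified value; B lists the two types in a fixed order.
def Pre_generate_rule_based_summary_py (messages : List (List (String × String))) : Prop :=
  ¬ (messages.any pvPreTech = true ∧ messages.any pvPreUrg = true)

instance (messages : List (List (String × String))) : Decidable (Pre_generate_rule_based_summary_py messages) := by
  unfold Pre_generate_rule_based_summary_py; infer_instance

def pvWitness_generate_rule_based_summary_py : (List (List (String × String))) :=
  [[("role", "user"), ("content", "urgent help")], [("role", "assistant"), ("content", "ok")]]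

def Spec_generate_rule_based_summary_py (messages : List (List (String × String))) (out : String) : Prop := out = generate_rule_based_summary_py_alt messages
instance (messages : List (List (String × String))) (out : String) : Decidable (Spec_generate_rule_based_summary_py messages out) := by unfold Spec_generate_rule_based_summary_py; infer_instance

-- ===== CLAIM (what is proved, stated in full; the proofs are below) =====
def Claim_equal_generate_rule_based_summary_py : Prop := ∀ (messages : List (List (String × String))), Dom_generate_rule_based_summary_py messages → Pre_generate_rule_based_summary_py messages → Spec_generate_rule_based_summary_py messages (generate_rule_based_summary_py messages)

-- ===== LEMMAS AND PROOFS =====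

-- content-only keyword tests (what pvA_attackStep reads on an already-filtered user message)
def pvTechC (m : List (String × String)) : Bool :=
  PySem.Str.isIn "database" (pvPreContent m) || PySem.Str.isIn "system" (pvPreContent m)

def pvUrgC (m : List (String × String)) : Bool :=
  PySem.Str.isIn "urgent" (pvPreContent m) || PySem.Str.isIn "help" (pvPreContent m)

def pvKinds (m : List (String × String)) : List String :=
  (if pvTechC m then ["technical_queries"] else []) ++ (if pvUrgC m then ["urgency_tactics"] else [])

lemma afold_spec (us : List (List (String × String))) (acc : List String) :
    us.foldl pvA_attackStep acc = acc ++ us.flatMap pvKinds := by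
  induction us generalizing acc with
  | nil => simp
  | cons m t ih =>
    simp only [List.foldl_cons, List.flatMap_cons, ih, pvA_attackStep, pvKinds, pvTechC, pvUrgC,
      pvPreContent]
    split_ifs <;> simp

lemma bfold_spec (l : List (List (String × String))) (t u a : Nat) (ht hu : Bool) :
    l.foldl pvB_step (t, u, a, ht, hu) =
      (t + l.length, u + (l.filter pvA_userPred).length, a + (l.filter pvA_assistantPred).length,
       ht || l.any pvPreTech, hu || l.any pvPreUrg) := by
  induction l generalizing t u a ht hu with
  | nil => simp
  | cons m tl ih =>
    simp only [List.foldl_cons, pvB_step]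
    by_cases h1 : (PySem.Dict.get? (PySem.Dict.mk m) "role" == some "user") = true
    · simp only [if_pos, ih, List.filter_cons, List.any_cons, pvA_userPred, h1,
        pvA_assistantPred, pvPreTech, pvPreUrg, pvPreContent]
      have h2 : (PySem.Dict.get? (PySem.Dict.mk m) "role" == some "assistant") = false := by
        rw [beq_iff_eq] at h1; simp [h1]
      simp only [h2, Bool.false_eq_true, if_false, Prod.mk.injEq]
      refine ⟨by simp [List.length_cons]; omega, by simp; omega, ?_, ?_, ?_⟩ <;>
        first | rfl | simp [Bool.true_and, Bool.or_assoc]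
    · simp only [Bool.not_eq_true] at h1
      simp only [h1, Bool.false_eq_true, if_false]
      by_cases h2 : (PySem.Dict.get? (PySem.Dict.mk m) "role" == some "assistant") = true
      · simp only [if_pos, ih, List.filter_cons, List.any_cons, pvA_userPred, h1,
          pvA_assistantPred, h2, pvPreTech, pvPreUrg]
        simp; omega
      · simp only [Bool.not_eq_true] at h2
        simp only [Bool.false_eq_true, if_false, ih, List.filter_cons, List.any_cons,
          pvA_userPred, h1, pvA_assistantPred, h2, pvPreTech, pvPreUrg]
        simp; omega

lemma set_ofList_const {a : String} (l : List String) (h : ∀ x ∈ l, x = a) (hne : l ≠ []) :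
    PySem.Set.ofList l = [a] := by
  have key : ∀ (l' : List String), (∀ x ∈ l', x = a) → List.foldl PySem.Set.add [a] l' = [a] := by
    intro l' hl'
    induction l' with
    | nil => rfl
    | cons x t ih =>
      have hx : x = a := hl' x (by simp)
      simp only [List.foldl_cons, hx, PySem.Set.add, PySem.Set.contains]
      simp only [List.elem_cons_self, if_pos]
      exact ih (fun y hy => hl' y (by simp [hy]))
  cases l with
  | nil => exact absurd rfl hne
  | cons x t =>
    have hx : x = a := h x (by simp)
    show List.foldl PySem.Set.add [] (x :: t) = [a]
    simp only [List.foldl_cons, hx, PySem.Set.add, PySem.Set.contains]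
    simp only [List.elem_nil, Bool.false_eq_true, if_false, List.nil_append]
    exact key t (fun y hy => h y (by simp [hy]))

lemma any_gated (l : List (List (String × String))) (q : List (String × String) → Bool) :
    (l.filter pvA_userPred).any q = l.any (fun m => pvA_userPred m && q m) :=
  List.any_filter

theorem generate_rule_based_summary_py_spec : Claim_equal_generate_rule_based_summary_py := by
  intro messages _hdom hpre
  unfold Spec_generate_rule_based_summary_py
  unfold generate_rule_based_summary_py generate_rule_based_summary_py_alt
  rw [bfold_spec]
  simp only [Nat.zero_add, Bool.false_or]
  rw [afold_spec]
  simp only [List.nil_append]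
  -- reduce both flags to facts about the flatMap list
  have hT : messages.any pvPreTech = (messages.filter pvA_userPred).any pvTechC := by
    rw [any_gated]; rfl
  have hU : messages.any pvPreUrg = (messages.filter pvA_userPred).any pvUrgC := by
    rw [any_gated]; rfl
  set us := messages.filter pvA_userPred with hus
  have hstr : (if (us.flatMap pvKinds).isEmpty then "various approaches"
               else PySem.Str.join ", " (PySem.Set.ofList (us.flatMap pvKinds))) =
              (if ((if messages.any pvPreTech then ["technical_queries"] else []) ++
                   (if messages.any pvPreUrg then ["urgency_tactics"] else [])).isEmpty
               then "various approaches"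
               else PySem.Str.join ", "
                 ((if messages.any pvPreTech then ["technical_queries"] else []) ++
                  (if messages.any pvPreUrg then ["urgency_tactics"] else []))) := by
    rw [hT, hU]
    unfold Pre_generate_rule_based_summary_py at hpre
    rw [hT, hU] at hpre
    by_cases hTt : us.any pvTechC = true
    · by_cases hUt : us.any pvUrgC = true
      · exact absurd ⟨hTt, hUt⟩ hpre
      · -- only technical
        simp only [Bool.not_eq_true] at hUt
        simp only [hTt, hUt, if_pos, Bool.false_eq_true, if_false, List.append_nil]
        have hall : ∀ x ∈ us.flatMap pvKinds, x = "technical_queries" := by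
          intro x hx
          rcases List.mem_flatMap.mp hx with ⟨m, hm, hxm⟩
          have hu : pvUrgC m = false := by
            by_contra h
            simp only [Bool.not_eq_false] at h
            exact absurd (List.any_of_mem hm h) (by simp [hUt])
          simp only [pvKinds, hu, Bool.false_eq_true, if_false, List.append_nil] at hxm
          by_cases htc : pvTechC m = true
          · simp [htc] at hxm; exact hxm
          · simp only [Bool.not_eq_true] at htc; simp [htc] at hxm
        have hne : us.flatMap pvKinds ≠ [] := by
          rcases List.any_eq_true.mp hTt with ⟨m, hm, hmt⟩
          intro h
          have := List.flatMap_eq_nil_iff.mp h m hm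
          simp only [pvKinds, hmt, if_pos] at this
          simp at this
        rw [set_ofList_const _ hall hne]
        simp [hne]
    · simp only [Bool.not_eq_true] at hTt
      simp only [hTt, Bool.false_eq_true, if_false, List.nil_append]
      by_cases hUt : us.any pvUrgC = true
      · -- only urgency
        simp only [hUt, if_pos]
        have hall : ∀ x ∈ us.flatMap pvKinds, x = "urgency_tactics" := by
          intro x hx
          rcases List.mem_flatMap.mp hx with ⟨m, hm, hxm⟩
          have ht2 : pvTechC m = false := by
            by_contra h
            simp only [Bool.not_eq_false] at h
            exact absurd (List.any_of_mem hm h) (by simp [hTt])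
          simp only [pvKinds, ht2, Bool.false_eq_true, if_false, List.nil_append] at hxm
          by_cases huc : pvUrgC m = true
          · simp [huc] at hxm; exact hxm
          · simp only [Bool.not_eq_true] at huc; simp [huc] at hxm
        have hne : us.flatMap pvKinds ≠ [] := by
          rcases List.any_eq_true.mp hUt with ⟨m, hm, hmt⟩
          intro h
          have := List.flatMap_eq_nil_iff.mp h m hm
          simp only [pvKinds, hmt, if_pos] at this
          simp at this
        rw [set_ofList_const _ hall hne]
        simp [hne]
      · -- neither
        simp only [Bool.not_eq_true] at hUt
        have hnil : us.flatMap pvKinds = [] := by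
          apply List.flatMap_eq_nil_iff.mpr
          intro m hm
          have h1 : pvTechC m = false := by
            by_contra h; simp only [Bool.not_eq_false] at h
            exact absurd (List.any_of_mem hm h) (by simp [hTt])
          have h2 : pvUrgC m = false := by
            by_contra h; simp only [Bool.not_eq_false] at h
            exact absurd (List.any_of_mem hm h) (by simp [hUt])
          simp [pvKinds, h1, h2]
        simp [hnil, hUt]
  rw [hstr]
  -- both sides are now the same components; compare as character lists
  apply String.toList_inj.mp
  simp [PySem.Str.toList_join, PySem.Chars.join, List.intercalate, List.intersperse,
    String.toList_append]
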